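-- pv_equiv track=rewrite | github.com/diveshjoshi0766/shopify_chatbot_backend | app/shopify/mcp_dev.py | parse_mcp_args
-- ===== SOURCE A (Python) =====
-- def parse_mcp_args(arg_string: str) -> list[str]:
--     """Split env-style args string into list (handles simple quoted segments)."""
--     s = (arg_string or "").strip()
--     if not s:
--         return ["-y", "@shopify/dev-mcp@latest"]
--     parts: list[str] = []
--     cur: list[str] = []
--     in_q: str | None = None
--     for ch in s:
--         if in_q:
--             if ch == in_q:
--                 in_q = None
--             else:
--                 cur.append(ch)
--         elif ch in "\"'":
--             in_q = ch
--         elif ch.isspace():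
--             if cur:
--                 parts.append("".join(cur))
--                 cur = []
--         else:
--             cur.append(ch)
--     if cur:
--         parts.append("".join(cur))
--     return parts if parts else ["-y", "@shopify/dev-mcp@latest"]
-- ===== SOURCE B (Python) =====
-- def parse_mcp_args(arg_string: str) -> list[str]:
--     """Split env-style args string into list (handles simple quoted segments)."""
--     default = ["-y", "@shopify/dev-mcp@latest"]
--     s = (arg_string or "").strip()
--     parts: list[str] = []
--     buf: list[str] = []
--     i, n = 0, len(s)
--     while i < n:
--         ch = s[i]
--         if ch in "\"'":
--             j = s.find(ch, i + 1)
--             if j < 0: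
--                 buf.extend(s[i + 1:])
--                 i = n
--             else:
--                 buf.extend(s[i + 1:j])
--                 i = j + 1
--         elif ch.isspace():
--             if buf:
--                 parts.append("".join(buf))
--                 buf = []
--             i += 1
--         else:
--             buf.append(ch)
--             i += 1
--     if buf:
--         parts.append("".join(buf))
--     return parts or default
-- ===== Notes on version B (the rewrite author's own statement) =====
-- stated objective: alternative
-- what changed: A tracks an in-quote flag in a per-character state machine; B is a state-flag-free scanner that consumes each quoted segment in one step via str.partition on the remaining string.
import Mathlib
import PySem

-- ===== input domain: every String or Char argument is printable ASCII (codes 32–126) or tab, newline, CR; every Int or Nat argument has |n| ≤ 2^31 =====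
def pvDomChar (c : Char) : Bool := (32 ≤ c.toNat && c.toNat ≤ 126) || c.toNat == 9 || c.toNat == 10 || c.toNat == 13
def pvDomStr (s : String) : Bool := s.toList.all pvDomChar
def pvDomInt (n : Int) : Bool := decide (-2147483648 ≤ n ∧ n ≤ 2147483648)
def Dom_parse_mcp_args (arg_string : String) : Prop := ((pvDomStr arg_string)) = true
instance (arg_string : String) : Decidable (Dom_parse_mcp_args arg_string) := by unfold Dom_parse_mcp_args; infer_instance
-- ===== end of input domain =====

-- B replaces A's per-character quote-state machine by a partition-based scanner that
-- consumes a whole quoted segment at once (objective: alternative decomposition, same cost).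

-- ===== PORT A =====
-- default list returned for empty input / no parts
def pvDefault : List String := ["-y", "@shopify/dev-mcp@latest"]

-- one step of A's 'for ch in s' loop; state = (parts, cur, in_q)
def pvStepA (st : List String × List Char × Option Char) (ch : Char) :
    List String × List Char × Option Char :=
  match st with
  | (parts, cur, some q) =>
      if ch = q then (parts, cur, none) else (parts, cur ++ [ch], some q)
  | (parts, cur, none) =>
      if ch = '"' ∨ ch = '\'' then (parts, cur, some ch)
      else if PySem.Chars.isspace ch then
        (if cur ≠ [] then (parts ++ [String.ofList cur], [], none) else (parts, cur, none))
      else (parts, cur ++ [ch], none)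

def parse_mcp_args (arg_string : String) : List String :=
  -- (arg_string or "") = arg_string for strings ("" is the only falsy string)
  let s := PySem.Chars.strip arg_string.toList
  if s = [] then pvDefault
  else
    match s.foldl pvStepA ([], [], none) with
    | (parts, cur, _) =>
      let parts := if cur ≠ [] then parts ++ [String.ofList cur] else parts
      if parts ≠ [] then parts else pvDefault

-- ===== PORT B =====
-- B's while loop; Source B's cursor i into s is represented by the remaining suffix s[i:]
-- (the list argument), so 'i = n' is [], 'i += 1' is the tail.  's.find(ch, i+1)' locating
-- the closing quote, with the slice s[i+1:j] before it, is ported exactly as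
-- (takeWhile (· ≠ ch), dropWhile (· ≠ ch)) on that suffix: j < 0 ↔ dropWhile = [].
def pvScanB (s buf : List Char) (parts : List String) : List String :=
  match s with
  | [] => if buf ≠ [] then parts ++ [String.ofList buf] else parts
  | ch :: rest =>
      if ch = '"' ∨ ch = '\'' then
        let seg := rest.takeWhile (· ≠ ch)
        let s' := match rest.dropWhile (· ≠ ch) with
                  | [] => []
                  | _ :: t => t
        pvScanB s' (buf ++ seg) parts
      else if PySem.Chars.isspace ch then
        pvScanB rest (if buf ≠ [] then [] else buf)
          (if buf ≠ [] then parts ++ [String.ofList buf] else parts)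
      else pvScanB rest (buf ++ [ch]) parts
termination_by s.length
decreasing_by
  · have h1 : (rest.dropWhile (· ≠ ch)).length ≤ rest.length := List.length_dropWhile_le _ _
    cases hd : rest.dropWhile (· ≠ ch) with
    | nil => simp
    | cons d t => simp only [hd] at h1 ⊢; simp at h1 ⊢; omega
  · simp
  · simp

def parse_mcp_args_alt (arg_string : String) : List String :=
  let s := PySem.Chars.strip arg_string.toList
  let parts := pvScanB s [] []
  if parts ≠ [] then parts else pvDefault

-- ===== PRECONDITION & SPEC =====
def Spec_parse_mcp_args (arg_string : String) (out : List String) : Prop := out = parse_mcp_args_alt arg_string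
instance (arg_string : String) (out : List String) : Decidable (Spec_parse_mcp_args arg_string out) := by unfold Spec_parse_mcp_args; infer_instance

-- ===== CLAIM (what is proved, stated in full; the proofs are below) =====
def Claim_equal_parse_mcp_args : Prop := ∀ (arg_string : String), Dom_parse_mcp_args arg_string → Spec_parse_mcp_args arg_string (parse_mcp_args arg_string)

-- ===== LEMMAS AND PROOFS =====

-- A's final flush, applied to the fold state (the quote flag is ignored by A's tail code)
def pvFinishA (st : List String × List Char × Option Char) : List String :=
  match st with
  | (parts, cur, _) => if cur ≠ [] then parts ++ [String.ofList cur] else parts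

-- inside a quote, A's loop consumes characters up to the first closing quote verbatim
lemma pvFoldA_quote (l : List Char) (parts : List String) (cur : List Char) (q : Char) :
    l.foldl pvStepA (parts, cur, some q) =
      match l.dropWhile (· ≠ q) with
      | [] => (parts, cur ++ l, some q)
      | _ :: t => t.foldl pvStepA (parts, cur ++ l.takeWhile (· ≠ q), none) := by
  induction l generalizing cur with
  | nil => simp
  | cons c rest ih =>
      by_cases hc : c = q
      · subst hc
        simp [pvStepA, List.dropWhile, List.takeWhile]
      · rw [List.foldl_cons]
        have hstep : pvStepA (parts, cur, some q) c = (parts, cur ++ [c], some q) := by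
          simp [pvStepA, hc]
        rw [hstep, ih (cur ++ [c]),
            List.dropWhile_cons_of_pos (by simp [hc]),
            List.takeWhile_cons_of_pos (by simp [hc])]
        cases rest.dropWhile (· ≠ q) with
        | nil => simp
        | cons d t => simp

-- the core correspondence: A's fold-then-flush equals B's scanner
lemma pvMain (n : Nat) (l : List Char) (hn : l.length ≤ n) (cur : List Char)
    (parts : List String) :
    pvFinishA (l.foldl pvStepA (parts, cur, none)) = pvScanB l cur parts := by
  induction n generalizing l cur parts with
  | zero =>
      have : l = [] := List.eq_nil_of_length_eq_zero (Nat.le_zero.mp hn)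
      subst this
      simp [pvScanB, pvFinishA]
  | succ n ih =>
      cases l with
      | nil => simp [pvScanB, pvFinishA]
      | cons ch rest =>
          by_cases hq : ch = '"' ∨ ch = '\''
          · simp only [List.foldl_cons, pvStepA, if_pos hq]
            rw [pvFoldA_quote, pvScanB]
            rw [if_pos hq]
            have hlen : (rest.dropWhile (· ≠ ch)).length ≤ rest.length :=
              List.length_dropWhile_le _ _
            cases hd : rest.dropWhile (· ≠ ch) with
            | nil =>
                have htw : rest.takeWhile (· ≠ ch) = rest := by
                  have := List.takeWhile_append_dropWhile (p := (· ≠ ch)) (l := rest)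
                  rw [hd, List.append_nil] at this; exact this
                rw [htw]
                simp [pvFinishA, pvScanB]
            | cons d t =>
                rw [hd] at hlen
                simp only [List.length_cons] at hlen
                simp only [List.length_cons] at hn
                exact ih t (by omega) _ _
          · simp only [List.foldl_cons, pvStepA, if_neg hq]
            rw [pvScanB, if_neg hq]
            by_cases hs : PySem.Chars.isspace ch = true
            · simp only [hs]
              by_cases hb : cur ≠ []
              · simp only [if_pos hb]
                exact ih rest (by simpa using Nat.le_of_succ_le_succ (by simpa using hn)) _ _
              · simp only [if_neg hb]
                exact ih rest (by simpa using Nat.le_of_succ_le_succ (by simpa using hn)) _ _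
            · simp only [hs, Bool.false_eq_true, if_false]
              exact ih rest (by simpa using Nat.le_of_succ_le_succ (by simpa using hn)) _ _

-- ===== VERDICT (by name: the statement is the Claim_ definition above) =====
theorem parse_mcp_args_spec : Claim_equal_parse_mcp_args := by
  intro arg_string _
  unfold Spec_parse_mcp_args parse_mcp_args parse_mcp_args_alt
  set s := PySem.Chars.strip arg_string.toList with hs
  have hmain := pvMain s.length s (le_refl _) [] []
  cases he : s with
  | nil => simp [pvScanB, pvDefault]
  | cons c t =>
      rw [he] at hmain
      simp only [reduceCtorEq]
      rw [← hmain]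
      cases hfold : (c :: t).foldl pvStepA ([], [], none) with
      | mk parts rest =>
          cases rest with
          | mk cur inq => simp [pvFinishA]
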